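-- pv_equiv track=rewrite | github.com/PatLittle/GC-News-Nouvelles-GC | scripts/scrape_half_masting.py | merge_rows
-- ===== SOURCE A (Python) =====
-- from typing import Dict, List
--
-- def merge_rows(en_rows: List[Dict[str, str]], fr_rows: List[Dict[str, str]]) -> List[Dict[str, str]]:
--     en_map: Dict[str, dict] = {r['id']: r for r in en_rows}
--     fr_map: Dict[str, dict] = {r['id']: r for r in fr_rows}
--
--     all_ids = sorted(set(en_map) | set(fr_map))
--     merged = []
--     for _id in all_ids:
--         en = en_map.get(_id, {})
--         fr = fr_map.get(_id, {})
--         merged.append({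
--             'id': _id,
--             'notice_en': en.get('notice', ''),
--             'period_en': en.get('period', ''),
--             'location_en': en.get('location', ''),
--             'details_en': en.get('details', ''),
--             'notice_fr': fr.get('notice', ''),
--             'period_fr': fr.get('period', ''),
--             'location_fr': fr.get('location', ''),
--             'details_fr': fr.get('details', ''),
--         })
--     return merged
-- ===== SOURCE B (Python) =====
-- from typing import Dict, List
--
-- _BLANK_FIELDS = ('notice_en', 'period_en', 'location_en', 'details_en',
--                  'notice_fr', 'period_fr', 'location_fr', 'details_fr')
--
-- def _blank(_id: str) -> Dict[str, str]:
--     rec = {'id': _id}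
--     for f in _BLANK_FIELDS:
--         rec[f] = ''
--     return rec
--
-- def merge_rows(en_rows: List[Dict[str, str]], fr_rows: List[Dict[str, str]]) -> List[Dict[str, str]]:
--     records: Dict[str, Dict[str, str]] = {}
--     for r in en_rows:
--         rec = records.setdefault(r['id'], _blank(r['id']))
--         rec['notice_en'] = r.get('notice', '')
--         rec['period_en'] = r.get('period', '')
--         rec['location_en'] = r.get('location', '')
--         rec['details_en'] = r.get('details', '')
--     for r in fr_rows:
--         rec = records.setdefault(r['id'], _blank(r['id']))
--         rec['notice_fr'] = r.get('notice', '')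
--         rec['period_fr'] = r.get('period', '')
--         rec['location_fr'] = r.get('location', '')
--         rec['details_fr'] = r.get('details', '')
--     return [records[_id] for _id in sorted(records)]
-- ===== Notes on version B (the rewrite author's own statement) =====
-- stated objective: simpler
-- what changed: B replaces A's two id->row maps plus a key-driven emit loop that extracts all eight fields per id by one combined id->record dict: each input pass creates a fully-defaulted bilingual record via setdefault and overwrites its four language fields in place, so the final loop just emits records in sorted-id order; Pre_ excludes only rows without an 'id' key, on which both A and B raise KeyError.
import Mathlib
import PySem

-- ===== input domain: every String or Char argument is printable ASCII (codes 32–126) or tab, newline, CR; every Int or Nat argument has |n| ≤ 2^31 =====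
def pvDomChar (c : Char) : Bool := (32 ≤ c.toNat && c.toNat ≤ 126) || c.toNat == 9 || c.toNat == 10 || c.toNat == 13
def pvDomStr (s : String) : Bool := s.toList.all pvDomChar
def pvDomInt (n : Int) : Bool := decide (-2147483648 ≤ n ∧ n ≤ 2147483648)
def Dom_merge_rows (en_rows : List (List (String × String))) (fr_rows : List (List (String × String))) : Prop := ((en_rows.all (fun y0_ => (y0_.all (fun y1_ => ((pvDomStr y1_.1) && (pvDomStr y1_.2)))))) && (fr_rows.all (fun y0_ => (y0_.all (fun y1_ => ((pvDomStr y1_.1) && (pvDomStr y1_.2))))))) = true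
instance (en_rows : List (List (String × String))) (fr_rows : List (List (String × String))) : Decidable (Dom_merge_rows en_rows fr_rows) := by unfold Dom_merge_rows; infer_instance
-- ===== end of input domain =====

-- B builds one id-keyed dict of fully-defaulted bilingual records in two passes
-- (setdefault + field overwrites) instead of A's two id->row maps queried per id
-- (objective: simpler — same result, one combined accumulator, trivial emit loop).

-- r.get(k, '') on a row dict; also used for r['id'], which is exact under
-- Pre_merge_rows (every row contains the key "id", so the default is never taken).
def pvRowGet (r : List (String × String)) (k : String) : String :=
  (PySem.Dict.mk r).getD k ""

-- ===== PORT A =====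
def merge_rows (en_rows : List (List (String × String))) (fr_rows : List (List (String × String))) : List (List (String × String)) :=
  let en_map : PySem.Dict String (List (String × String)) :=
    en_rows.foldl (fun d r => d.insert (pvRowGet r "id") r) PySem.Dict.empty
  let fr_map : PySem.Dict String (List (String × String)) :=
    fr_rows.foldl (fun d r => d.insert (pvRowGet r "id") r) PySem.Dict.empty
  let all_ids := PySem.List.sorted
    (PySem.Set.union (PySem.Set.ofList en_map.keys) (PySem.Set.ofList fr_map.keys))
    (fun x => x) false
  all_ids.foldl (fun merged _id =>
    let en := (en_map.get? _id).getD []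
    let fr := (fr_map.get? _id).getD []
    merged ++ [[("id", _id),
      ("notice_en", pvRowGet en "notice"), ("period_en", pvRowGet en "period"),
      ("location_en", pvRowGet en "location"), ("details_en", pvRowGet en "details"),
      ("notice_fr", pvRowGet fr "notice"), ("period_fr", pvRowGet fr "period"),
      ("location_fr", pvRowGet fr "location"), ("details_fr", pvRowGet fr "details")]]) []

-- ===== PORT B =====
def pvBlankFields : List String :=
  ["notice_en", "period_en", "location_en", "details_en",
   "notice_fr", "period_fr", "location_fr", "details_fr"]

-- _blank(_id)
def pvBlank (i : String) : PySem.Dict String String :=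
  pvBlankFields.foldl (fun rec f => rec.insert f "") (PySem.Dict.mk [("id", i)])

-- one en-loop body: rec = records.setdefault(...); four field writes (written back at the end,
-- modelling Python's in-place mutation of the aliased dict)
def pvStepEn (records : PySem.Dict String (PySem.Dict String String)) (r : List (String × String)) : PySem.Dict String (PySem.Dict String String) :=
  let i := pvRowGet r "id"
  let records := records.setdefault i (pvBlank i)
  let rec0 := records.getD i (pvBlank i)
  let rec1 := rec0.insert "notice_en" (pvRowGet r "notice")
  let rec2 := rec1.insert "period_en" (pvRowGet r "period")
  let rec3 := rec2.insert "location_en" (pvRowGet r "location")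
  let rec4 := rec3.insert "details_en" (pvRowGet r "details")
  records.insert i rec4

-- one fr-loop body
def pvStepFr (records : PySem.Dict String (PySem.Dict String String)) (r : List (String × String)) : PySem.Dict String (PySem.Dict String String) :=
  let i := pvRowGet r "id"
  let records := records.setdefault i (pvBlank i)
  let rec0 := records.getD i (pvBlank i)
  let rec1 := rec0.insert "notice_fr" (pvRowGet r "notice")
  let rec2 := rec1.insert "period_fr" (pvRowGet r "period")
  let rec3 := rec2.insert "location_fr" (pvRowGet r "location")
  let rec4 := rec3.insert "details_fr" (pvRowGet r "details")
  records.insert i rec4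

def merge_rows_alt (en_rows : List (List (String × String))) (fr_rows : List (List (String × String))) : List (List (String × String)) :=
  let records := en_rows.foldl pvStepEn PySem.Dict.empty
  let records := fr_rows.foldl pvStepFr records
  (PySem.List.sorted records.keys (fun x => x) false).map
    (fun i => (records.getD i PySem.Dict.empty).items)

-- ===== PRECONDITION & SPEC =====
-- Pre_: every row carries the key "id"; on a row without it both Pythons' r['id'] raises KeyError.
def Pre_merge_rows (en_rows : List (List (String × String))) (fr_rows : List (List (String × String))) : Prop :=
  (∀ r ∈ en_rows, (PySem.Dict.mk r).contains "id" = true) ∧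
  (∀ r ∈ fr_rows, (PySem.Dict.mk r).contains "id" = true)
instance (en_rows : List (List (String × String))) (fr_rows : List (List (String × String))) : Decidable (Pre_merge_rows en_rows fr_rows) := by unfold Pre_merge_rows; infer_instance

def pvWitness_merge_rows : (List (List (String × String))) × (List (List (String × String))) :=
  ([[("id", "b"), ("notice", "n")]], [[("id", "a")]])

def Spec_merge_rows (en_rows : List (List (String × String))) (fr_rows : List (List (String × String))) (out : List (List (String × String))) : Prop := out = merge_rows_alt en_rows fr_rows
instance (en_rows : List (List (String × String))) (fr_rows : List (List (String × String))) (out : List (List (String × String))) : Decidable (Spec_merge_rows en_rows fr_rows out) := by unfold Spec_merge_rows; infer_instance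

-- ===== CLAIM (what is proved, stated in full; the proofs are below) =====
def Claim_equal_merge_rows : Prop := ∀ (en_rows : List (List (String × String))) (fr_rows : List (List (String × String))), Dom_merge_rows en_rows fr_rows → Pre_merge_rows en_rows fr_rows → Spec_merge_rows en_rows fr_rows (merge_rows en_rows fr_rows)

-- ===== LEMMAS AND PROOFS =====

-- a bilingual record with the fixed key skeleton; pvBlank i = pvRec i '' … ''
def pvRec (i a b c d e f g h : String) : PySem.Dict String String :=
  PySem.Dict.mk [("id", i), ("notice_en", a), ("period_en", b), ("location_en", c),
    ("details_en", d), ("notice_fr", e), ("period_fr", f), ("location_fr", g), ("details_fr", h)]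

theorem pvBlank_eq (i : String) : pvBlank i = pvRec i "" "" "" "" "" "" "" "" := by
  simp [pvBlank, pvBlankFields, pvRec, PySem.Dict.insert]

-- the four en writes on a skeleton record
def pvSetEn (rec : PySem.Dict String String) (r : List (String × String)) : PySem.Dict String String :=
  ((((rec.insert "notice_en" (pvRowGet r "notice")).insert "period_en" (pvRowGet r "period")).insert
      "location_en" (pvRowGet r "location")).insert "details_en" (pvRowGet r "details"))
def pvSetFr (rec : PySem.Dict String String) (r : List (String × String)) : PySem.Dict String String :=
  ((((rec.insert "notice_fr" (pvRowGet r "notice")).insert "period_fr" (pvRowGet r "period")).insert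
      "location_fr" (pvRowGet r "location")).insert "details_fr" (pvRowGet r "details"))

theorem pvSetEn_rec (i a b c d e f g h : String) (r : List (String × String)) :
    pvSetEn (pvRec i a b c d e f g h) r
      = pvRec i (pvRowGet r "notice") (pvRowGet r "period") (pvRowGet r "location") (pvRowGet r "details") e f g h := by
  simp [pvSetEn, pvRec, PySem.Dict.insert]

theorem pvSetFr_rec (i a b c d e f g h : String) (r : List (String × String)) :
    pvSetFr (pvRec i a b c d e f g h) r
      = pvRec i a b c d (pvRowGet r "notice") (pvRowGet r "period") (pvRowGet r "location") (pvRowGet r "details") := by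
  simp [pvSetFr, pvRec, PySem.Dict.insert]

theorem get?_stepEn (d : PySem.Dict String (PySem.Dict String String)) (r : List (String × String)) (k : String) :
    (pvStepEn d r).get? k
      = if k = pvRowGet r "id" then some (pvSetEn ((d.get? k).getD (pvBlank k)) r) else d.get? k := by
  unfold pvStepEn
  have hgd : (d.setdefault (pvRowGet r "id") (pvBlank (pvRowGet r "id"))).getD (pvRowGet r "id") (pvBlank (pvRowGet r "id"))
      = (d.get? (pvRowGet r "id")).getD (pvBlank (pvRowGet r "id")) := by
    rw [PySem.Dict.getD_eq_get?_getD, PySem.Dict.get?_setdefault_self]; rfl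
  by_cases h : k = pvRowGet r "id"
  · subst h
    simp [hgd, PySem.Dict.get?_insert_self, pvSetEn]
  · rw [if_neg h, PySem.Dict.get?_insert_of_ne _ _ h]
    by_cases hc : d.contains (pvRowGet r "id")
    · rw [PySem.Dict.setdefault_of_contains (h := hc)]
    · rw [PySem.Dict.setdefault_of_not_contains (h := by simpa using hc),
        PySem.Dict.get?_insert_of_ne _ _ h]

theorem get?_stepFr (d : PySem.Dict String (PySem.Dict String String)) (r : List (String × String)) (k : String) :
    (pvStepFr d r).get? k
      = if k = pvRowGet r "id" then some (pvSetFr ((d.get? k).getD (pvBlank k)) r) else d.get? k := by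
  unfold pvStepFr
  have hgd : (d.setdefault (pvRowGet r "id") (pvBlank (pvRowGet r "id"))).getD (pvRowGet r "id") (pvBlank (pvRowGet r "id"))
      = (d.get? (pvRowGet r "id")).getD (pvBlank (pvRowGet r "id")) := by
    rw [PySem.Dict.getD_eq_get?_getD, PySem.Dict.get?_setdefault_self]; rfl
  by_cases h : k = pvRowGet r "id"
  · subst h
    simp [hgd, PySem.Dict.get?_insert_self, pvSetFr]
  · rw [if_neg h, PySem.Dict.get?_insert_of_ne _ _ h]
    by_cases hc : d.contains (pvRowGet r "id")
    · rw [PySem.Dict.setdefault_of_contains (h := hc)]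
    · rw [PySem.Dict.setdefault_of_not_contains (h := by simpa using hc),
        PySem.Dict.get?_insert_of_ne _ _ h]

-- the en pass from empty: lookup at k is the record of the LAST en row with id k
theorem get?_foldl_en (rows : List (List (String × String))) (k : String) :
    ((rows.foldl pvStepEn PySem.Dict.empty).get? k)
      = match rows.reverse.find? (fun r => pvRowGet r "id" == k) with
        | some r => some (pvRec k (pvRowGet r "notice") (pvRowGet r "period") (pvRowGet r "location") (pvRowGet r "details") "" "" "" "")
        | none => none := by
  induction rows using List.reverseRecOn with
  | nil => simp
  | append_singleton rs r ih =>
    rw [List.foldl_append, List.foldl_cons, List.foldl_nil, get?_stepEn, List.reverse_append,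
      List.reverse_singleton, List.singleton_append, List.find?_cons]
    by_cases h : k = pvRowGet r "id"
    · have hb : (pvRowGet r "id" == k) = true := by simpa using h.symm
      rw [if_pos h]
      simp only [hb]
      rcases hm : rs.reverse.find? (fun r => pvRowGet r "id" == k) with _ | r'
      · simp only [ih, hm, Option.getD_none, pvBlank_eq, pvSetEn_rec]
      · simp only [ih, hm, Option.getD_some, pvSetEn_rec]
    · have hb : (pvRowGet r "id" == k) = false := by simpa using fun hh => h hh.symm
      rw [if_neg h, ih]
      simp only [hb]

-- the fr pass on top of any skeleton-shaped start
theorem get?_foldl_fr (frs : List (List (String × String))) (d : PySem.Dict String (PySem.Dict String String))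
    (k e1 e2 e3 e4 : String)
    (hd : d.get? k = none ∨ d.get? k = some (pvRec k e1 e2 e3 e4 "" "" "" ""))
    (hnone : d.get? k = none → e1 = "" ∧ e2 = "" ∧ e3 = "" ∧ e4 = "") :
    ((frs.foldl pvStepFr d).get? k)
      = match frs.reverse.find? (fun r => pvRowGet r "id" == k) with
        | some r => some (pvRec k e1 e2 e3 e4 (pvRowGet r "notice") (pvRowGet r "period") (pvRowGet r "location") (pvRowGet r "details"))
        | none => d.get? k := by
  induction frs using List.reverseRecOn with
  | nil => simp
  | append_singleton rs r ih =>
    rw [List.foldl_append, List.foldl_cons, List.foldl_nil, get?_stepFr, List.reverse_append,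
      List.reverse_singleton, List.singleton_append, List.find?_cons]
    by_cases h : k = pvRowGet r "id"
    · have hb : (pvRowGet r "id" == k) = true := by simpa using h.symm
      rw [if_pos h]
      simp only [hb]
      rcases hm : rs.reverse.find? (fun r => pvRowGet r "id" == k) with _ | r'
      · rw [ih]
        simp only [hm]
        rcases hd with hd | hd
        · obtain ⟨h1, h2, h3, h4⟩ := hnone hd
          simp only [hd, Option.getD_none, pvBlank_eq, pvSetFr_rec, h1, h2, h3, h4]
        · simp only [hd, Option.getD_some, pvSetFr_rec]
      · rw [ih]
        simp only [hm, Option.getD_some, pvSetFr_rec]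
    · have hb : (pvRowGet r "id" == k) = false := by simpa using fun hh => h hh.symm
      rw [if_neg h, ih]
      simp only [hb]

-- keys through one step / one pass (either language)
theorem keys_stepEn (d : PySem.Dict String (PySem.Dict String String)) (r : List (String × String)) :
    (pvStepEn d r).keys = PySem.Set.add d.keys (pvRowGet r "id") := by
  unfold pvStepEn
  dsimp only
  by_cases hc : d.contains (pvRowGet r "id")
  · rw [PySem.Dict.setdefault_of_contains (h := hc),
      PySem.Dict.keys_insert_of_contains (h := hc),
      PySem.Set.add_of_mem ((PySem.Dict.contains_iff_mem_keys _ _).mp hc)]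
  · have hnc : d.contains (pvRowGet r "id") = false := by simpa using hc
    rw [PySem.Dict.setdefault_of_not_contains (h := hnc),
      PySem.Dict.keys_insert_of_contains (h := PySem.Dict.contains_insert_self _ _ _),
      PySem.Dict.keys_insert_of_not_contains (h := hnc),
      PySem.Set.add_of_not_mem (by simpa [PySem.Dict.contains_iff_mem_keys] using hc)]

theorem keys_stepFr (d : PySem.Dict String (PySem.Dict String String)) (r : List (String × String)) :
    (pvStepFr d r).keys = PySem.Set.add d.keys (pvRowGet r "id") := by
  unfold pvStepFr
  dsimp only
  by_cases hc : d.contains (pvRowGet r "id")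
  · rw [PySem.Dict.setdefault_of_contains (h := hc),
      PySem.Dict.keys_insert_of_contains (h := hc),
      PySem.Set.add_of_mem ((PySem.Dict.contains_iff_mem_keys _ _).mp hc)]
  · have hnc : d.contains (pvRowGet r "id") = false := by simpa using hc
    rw [PySem.Dict.setdefault_of_not_contains (h := hnc),
      PySem.Dict.keys_insert_of_contains (h := PySem.Dict.contains_insert_self _ _ _),
      PySem.Dict.keys_insert_of_not_contains (h := hnc),
      PySem.Set.add_of_not_mem (by simpa [PySem.Dict.contains_iff_mem_keys] using hc)]

theorem keys_foldl_en (rows : List (List (String × String))) (d : PySem.Dict String (PySem.Dict String String)) :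
    (rows.foldl pvStepEn d).keys = PySem.Set.update d.keys (rows.map (fun r => pvRowGet r "id")) := by
  induction rows generalizing d with
  | nil => simp [PySem.Set.update_nil]
  | cons r rs ih =>
    rw [List.foldl_cons, ih, List.map_cons, PySem.Set.update_cons, keys_stepEn]

theorem keys_foldl_fr (rows : List (List (String × String))) (d : PySem.Dict String (PySem.Dict String String)) :
    (rows.foldl pvStepFr d).keys = PySem.Set.update d.keys (rows.map (fun r => pvRowGet r "id")) := by
  induction rows generalizing d with
  | nil => simp [PySem.Set.update_nil]
  | cons r rs ih =>
    rw [List.foldl_cons, ih, List.map_cons, PySem.Set.update_cons, keys_stepFr]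

-- A's id->row dict looks up to the LAST matching row
theorem pv_get?_foldl_insert (rows : List (List (String × String)))
    (d : PySem.Dict String (List (String × String))) (k : String) :
    (rows.foldl (fun d r => d.insert (pvRowGet r "id") r) d).get? k
      = (rows.reverse.find? (fun r => pvRowGet r "id" == k)).or (d.get? k) := by
  induction rows generalizing d with
  | nil => simp
  | cons r rs ih =>
    simp only [List.foldl_cons, ih, List.reverse_cons, List.find?_append]
    by_cases h : k = pvRowGet r "id"
    · simp [List.find?, h]
    · have hb : (pvRowGet r "id" == k) = false := beq_eq_false_iff_ne.mpr (Ne.symm h)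
      simp [PySem.Dict.get?_insert, List.find?, h, hb]

theorem pv_keys_foldl_insert (rows : List (List (String × String))) :
    (rows.foldl (fun d r => d.insert (pvRowGet r "id") r)
        (PySem.Dict.empty : PySem.Dict String (List (String × String)))).keys
      = PySem.Set.ofList (rows.map (fun r => pvRowGet r "id")) := by
  rw [PySem.Dict.keys_foldl_insert_key rows (fun r => pvRowGet r "id") (fun _ r => r)]
  rfl

-- a row matches somewhere in rows iff k is one of the ids
theorem pv_find?_isSome (rows : List (List (String × String))) (k : String) :
    (rows.reverse.find? (fun r => pvRowGet r "id" == k)).isSome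
      ↔ k ∈ rows.map (fun r => pvRowGet r "id") := by
  rw [List.find?_isSome]
  constructor
  · rintro ⟨r, hr, hp⟩
    exact List.mem_map.mpr ⟨r, List.mem_reverse.mp hr, by simpa using hp⟩
  · rintro hk
    obtain ⟨r, hr, he⟩ := List.mem_map.mp hk
    exact ⟨r, List.mem_reverse.mpr hr, by simpa using he⟩

-- ===== VERDICT (by name: the statement is the Claim_ definition above) =====
theorem merge_rows_spec : Claim_equal_merge_rows := by
  intro en_rows fr_rows _ _
  unfold Spec_merge_rows merge_rows merge_rows_alt
  dsimp only
  rw [pv_keys_foldl_insert, pv_keys_foldl_insert,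
    PySem.Set.ofList_eq_self_of_nodup _ (PySem.Set.nodup_ofList _),
    PySem.Set.ofList_eq_self_of_nodup _ (PySem.Set.nodup_ofList _),
    keys_foldl_fr, keys_foldl_en, PySem.Dict.keys_empty, PySem.Set.update_nil_left,
    PySem.List.foldl_append_singleton_eq_map, List.nil_append]
  have hids : PySem.List.sorted
      (PySem.Set.union (PySem.Set.ofList (en_rows.map (fun r => pvRowGet r "id")))
        (PySem.Set.ofList (fr_rows.map (fun r => pvRowGet r "id")))) (fun x => x) false
    = PySem.List.sorted
      (PySem.Set.update (PySem.Set.ofList (en_rows.map (fun r => pvRowGet r "id")))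
        (fr_rows.map (fun r => pvRowGet r "id"))) (fun x => x) false := by
    refine PySem.List.sorted_eq_sorted_of_perm _ _ _ (fun a b h => h) ?_
    refine (List.perm_ext_iff_of_nodup
      (PySem.Set.nodup_union _ _ (PySem.Set.nodup_ofList _))
      (PySem.Set.nodup_update _ _ (PySem.Set.nodup_ofList _))).mpr ?_
    intro x
    simp [PySem.Set.mem_union, PySem.Set.mem_update, PySem.Set.mem_ofList]
  rw [hids]
  refine List.map_congr_left (fun k hk => ?_)
  have hkmem : k ∈ en_rows.map (fun r => pvRowGet r "id") ∨ k ∈ fr_rows.map (fun r => pvRowGet r "id") := by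
    have := (PySem.List.mem_sorted _ _ _ _).mp hk
    simpa [PySem.Set.mem_update, PySem.Set.mem_ofList] using this
  rw [pv_get?_foldl_insert, pv_get?_foldl_insert, PySem.Dict.get?_empty, Option.or_none, Option.or_none,
    PySem.Dict.getD_eq_get?_getD]
  rcases hEn : en_rows.reverse.find? (fun r => pvRowGet r "id" == k) with _ | re
  · rcases hFr : fr_rows.reverse.find? (fun r => pvRowGet r "id" == k) with _ | rf
    · exfalso
      rcases hkmem with hm | hm
      · have := (pv_find?_isSome en_rows k).mpr hm
        rw [hEn] at this; simp at this
      · have := (pv_find?_isSome fr_rows k).mpr hm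
        rw [hFr] at this; simp at this
    · have hrec := get?_foldl_fr fr_rows (en_rows.foldl pvStepEn PySem.Dict.empty) k "" "" "" ""
        (Or.inl (by rw [get?_foldl_en, hEn])) (fun _ => ⟨rfl, rfl, rfl, rfl⟩)
      rw [hFr] at hrec
      rw [hrec]
      simp [pvRec, pvRowGet, PySem.Dict.getD, PySem.Dict.get?]
  · have hrec := get?_foldl_fr fr_rows (en_rows.foldl pvStepEn PySem.Dict.empty) k
      (pvRowGet re "notice") (pvRowGet re "period") (pvRowGet re "location") (pvRowGet re "details")
      (Or.inr (by rw [get?_foldl_en, hEn])) (by rw [get?_foldl_en, hEn]; intro h; cases h)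
    rcases hFr : fr_rows.reverse.find? (fun r => pvRowGet r "id" == k) with _ | rf
    · rw [hFr] at hrec
      rw [hrec, get?_foldl_en, hEn]
      simp [pvRec, pvRowGet, PySem.Dict.getD, PySem.Dict.get?]
    · rw [hFr] at hrec
      rw [hrec]
      simp [pvRec, pvRowGet, PySem.Dict.getD, PySem.Dict.get?]
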